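-- pv_equiv track=rewrite | github.com/Ocrim93/Crypto-Trading-Bot | Utilities/utilities_test.py | how_to_divide_multi_plot
-- ===== SOURCE A (Python) =====
-- def how_to_divide_multi_plot(n):
-- 	row = 1
-- 	column = 1
-- 	increase = True
--
-- 	while row*column < n:
-- 		if increase:
-- 			row = row + 1
-- 			increase = False
-- 		else:
-- 			increae = True
-- 			column = column + 1
--
-- 	return int(str(row)+str(column) + str(1))
-- ===== SOURCE B (Python) =====
-- def how_to_divide_multi_plot(n):
--     # Closed form: the loop's first step sets row=2 and (because the flag is
--     # never reset) every later step only grows column, up to ceil(n/2).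
--     if n <= 1:
--         return 111
--     return int("2" + str((n + 1) // 2) + "1")
-- ===== Notes on version B (the rewrite author's own statement) =====
-- stated objective: faster
-- what changed: Replaces the O(n) while-loop that grows the grid one cell at a time with the closed form row=2 (111 for n<=1), column=ceil(n/2), building the digit string directly.
import Mathlib
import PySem

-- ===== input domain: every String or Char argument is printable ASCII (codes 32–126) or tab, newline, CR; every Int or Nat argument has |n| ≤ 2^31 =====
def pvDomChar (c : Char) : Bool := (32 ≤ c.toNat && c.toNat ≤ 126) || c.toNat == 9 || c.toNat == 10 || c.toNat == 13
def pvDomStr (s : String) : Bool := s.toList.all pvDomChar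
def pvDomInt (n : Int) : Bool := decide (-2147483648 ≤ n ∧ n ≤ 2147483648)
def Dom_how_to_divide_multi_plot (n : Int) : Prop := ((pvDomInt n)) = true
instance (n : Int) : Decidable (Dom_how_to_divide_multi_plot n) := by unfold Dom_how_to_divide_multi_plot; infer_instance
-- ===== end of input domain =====

-- B replaces A's O(n) one-cell-at-a-time while-loop by the closed form
-- row = 2 (111 for n ≤ 1), column = ceil(n/2); return value only, no side effects.

-- ===== PORT A =====
-- A's while-loop, carrying (row, column, increase); the Nat fuel only makes the
-- recursion structural (n.toNat + 2 steps always suffice, proved below), it does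
-- not change the computation on any input
def how_to_divide_multi_plot.loop (fuel : Nat) (n row column : Int) (increase : Bool) : Int × Int :=
  match fuel with
  | 0 => (row, column)
  | fuel + 1 =>
    if row * column < n then
      if increase then
        how_to_divide_multi_plot.loop fuel n (row + 1) column false
      else
        -- 'increae = True' in the source is a typo binding a fresh name: no state change
        how_to_divide_multi_plot.loop fuel n row (column + 1) increase
    else (row, column)

def how_to_divide_multi_plot (n : Int) : Int :=
  let rc := how_to_divide_multi_plot.loop (n.toNat + 2) n 1 1 true
  -- int(str(row)+str(column)+str(1)); the string is always a valid decimal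
  -- numeral (row, column ≥ 1), so the parse never fails and .getD 0 is exact
  (PySem.Int.ofStr? (PySem.Int.toStr rc.1 ++ PySem.Int.toStr rc.2 ++ PySem.Int.toStr 1)).getD 0

-- ===== PORT B =====
def how_to_divide_multi_plot_alt (n : Int) : Int :=
  if n ≤ 1 then 111
  else
    (PySem.Int.ofStr? ("2" ++ PySem.Int.toStr (PySem.Int.floordiv (n + 1) 2) ++ "1")).getD 0

-- ===== PRECONDITION & SPEC =====
def Spec_how_to_divide_multi_plot (n : Int) (out : Int) : Prop := out = how_to_divide_multi_plot_alt n
instance (n : Int) (out : Int) : Decidable (Spec_how_to_divide_multi_plot n out) := by unfold Spec_how_to_divide_multi_plot; infer_instance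

-- ===== CLAIM (what is proved, stated in full; the proofs are below) =====
def Claim_equal_how_to_divide_multi_plot : Prop := ∀ (n : Int), Dom_how_to_divide_multi_plot n → Spec_how_to_divide_multi_plot n (how_to_divide_multi_plot n)

-- ===== LEMMAS AND PROOFS =====

-- once increase is false at the reachable state row = 2, the loop only grows
-- column and stops exactly at ⌈n/2⌉ = (n+1)//2
theorem loop_false_row2 (n : Int) : ∀ (fuel : Nat) (c : Int), 1 ≤ c →
    c ≤ PySem.Int.floordiv (n + 1) 2 →
    (PySem.Int.floordiv (n + 1) 2 - c).toNat < fuel →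
    how_to_divide_multi_plot.loop fuel n 2 c false = (2, PySem.Int.floordiv (n + 1) 2) := by
  have hm : PySem.Int.floordiv (n + 1) 2 * 2 ≤ n + 1 ∧ n + 1 < (PySem.Int.floordiv (n + 1) 2 + 1) * 2 :=
    (PySem.Int.floordiv_eq_iff_of_pos (by norm_num)).1 rfl
  intro fuel
  induction fuel with
  | zero => intro c _ _ hk; omega
  | succ fuel ih =>
    intro c hc hcm hk
    rw [how_to_divide_multi_plot.loop]
    by_cases h : 2 * c < n
    · simp only [h, if_pos, if_neg (Bool.false_ne_true)]
      exact ih (c + 1) (by omega) (by omega) (by omega)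
    · simp only [h, if_neg, not_false_iff]
      have : c = PySem.Int.floordiv (n + 1) 2 := by omega
      rw [this]

theorem how_to_divide_multi_plot_eq (n : Int) :
    how_to_divide_multi_plot n = how_to_divide_multi_plot_alt n := by
  unfold how_to_divide_multi_plot how_to_divide_multi_plot_alt
  have hfuel : n.toNat + 2 = (n.toNat + 1) + 1 := rfl
  rw [hfuel, how_to_divide_multi_plot.loop]
  by_cases h1 : n ≤ 1
  · have : ¬ ((1 : Int) * 1 < n) := by omega
    simp only [this, if_neg, not_false_iff, h1, if_pos]
    decide
  · have hn : 2 ≤ n := by omega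
    have hm : PySem.Int.floordiv (n + 1) 2 * 2 ≤ n + 1 ∧ n + 1 < (PySem.Int.floordiv (n + 1) 2 + 1) * 2 :=
      (PySem.Int.floordiv_eq_iff_of_pos (by norm_num)).1 rfl
    have hlt : (1 : Int) * 1 < n := by omega
    simp only [hlt, if_pos]
    norm_num
    rw [loop_false_row2 n (n.toNat + 1) 1 (by norm_num) (by omega) (by omega)]
    have h2s : PySem.Int.toStr 2 = "2" := by decide
    have h1s : PySem.Int.toStr 1 = "1" := by decide
    simp only [if_neg h1, h2s, h1s]
    rw [PySem.Int.floordiv_eq_ediv_of_pos (by norm_num)]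

-- ===== VERDICT (by name: the statement is the Claim_ definition above) =====
theorem how_to_divide_multi_plot_spec : Claim_equal_how_to_divide_multi_plot := by
  intro n _
  exact how_to_divide_multi_plot_eq n
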